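-- pv_equiv track=rewrite | github.com/Elder19/ING-COMPUTACION | intro y taller semestre 1/taller/labs-examen/examen 1 intro.py | crearmodulo
-- ===== SOURCE A (Python) =====
-- def crearmodulo(grupo):
--     modulo=10
--     contador=1
--     if grupo==1:
--         return modulo
--     while contador<=grupo:
--         modulo*=10
--         contador+=1
--
--     return modulo
-- ===== SOURCE B (Python) =====
-- def crearmodulo(grupo):
--     # Closed form: for grupo <= 1 the loop contributes nothing (or grupo==1 short-circuits),
--     # otherwise the loop multiplies 10 by 10 exactly grupo times.
--     if grupo <= 1:
--         return 10
--     return 10 ** (grupo + 1)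
-- ===== Notes on version B (the rewrite author's own statement) =====
-- stated objective: faster
-- what changed: Replaced the O(grupo) multiply-accumulate while-loop with a closed-form power: 10 for grupo <= 1, else 10**(grupo+1).
import Mathlib
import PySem

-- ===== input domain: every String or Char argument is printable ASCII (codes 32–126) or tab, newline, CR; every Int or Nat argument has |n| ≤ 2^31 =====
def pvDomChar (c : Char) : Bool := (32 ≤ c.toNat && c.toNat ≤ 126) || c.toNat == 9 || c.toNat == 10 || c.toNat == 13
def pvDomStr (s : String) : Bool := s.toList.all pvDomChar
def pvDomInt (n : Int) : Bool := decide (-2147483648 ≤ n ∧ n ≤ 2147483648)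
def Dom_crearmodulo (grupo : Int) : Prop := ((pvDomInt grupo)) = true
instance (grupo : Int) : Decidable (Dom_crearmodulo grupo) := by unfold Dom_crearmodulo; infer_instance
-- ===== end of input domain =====

-- B replaces A's multiply-accumulate while-loop with a closed-form power of ten (faster).


-- ===== PORT A =====
-- the while loop: while contador <= grupo: modulo *= 10; contador += 1
def crearmoduloLoop (grupo modulo contador : Int) : Int :=
  if contador ≤ grupo then crearmoduloLoop grupo (modulo * 10) (contador + 1) else modulo
termination_by (grupo + 1 - contador).toNat
decreasing_by omega

def crearmodulo (grupo : Int) : Int :=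
  if grupo == 1 then 10 else crearmoduloLoop grupo 10 1

-- ===== PORT B =====
def crearmodulo_alt (grupo : Int) : Int :=
  if grupo ≤ 1 then 10 else 10 ^ (grupo + 1).toNat

-- ===== PRECONDITION & SPEC =====
def Spec_crearmodulo (grupo : Int) (out : Int) : Prop := out = crearmodulo_alt grupo
instance (grupo : Int) (out : Int) : Decidable (Spec_crearmodulo grupo out) := by unfold Spec_crearmodulo; infer_instance

-- ===== CLAIM (what is proved, stated in full; the proofs are below) =====
def Claim_equal_crearmodulo : Prop := ∀ (grupo : Int), Dom_crearmodulo grupo → Spec_crearmodulo grupo (crearmodulo grupo)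

-- ===== LEMMAS AND PROOFS =====
theorem crearmoduloLoop_eq (grupo modulo contador : Int) :
    crearmoduloLoop grupo modulo contador = modulo * 10 ^ (grupo + 1 - contador).toNat := by
  fun_induction crearmoduloLoop grupo modulo contador with
  | case1 m c h ih =>
    rw [ih]
    have h1 : (grupo + 1 - c).toNat = (grupo + 1 - (c + 1)).toNat + 1 := by omega
    rw [h1, pow_succ]
    ring
  | case2 m c h =>
    have h1 : (grupo + 1 - c).toNat = 0 := by omega
    simp [h1]

-- ===== VERDICT (by name: the statement is the Claim_ definition above) =====
theorem crearmodulo_spec : Claim_equal_crearmodulo := by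
  intro g _
  unfold Spec_crearmodulo crearmodulo crearmodulo_alt
  rw [crearmoduloLoop_eq]
  by_cases h1 : g = 1
  · simp [h1]
  · simp only [beq_iff_eq, h1, if_false]
    by_cases h2 : g ≤ 1
    · have hg : g.toNat = 0 := by omega
      simp [h2, hg]
    · have : (g + 1).toNat = (g + 1 - 1).toNat + 1 := by omega
      rw [if_neg h2, this, pow_succ]
      ring
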